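-- pv_equiv track=rewrite | github.com/natn2014/Detection | OCR_Project/main_ocr_mark.py | decode_free_3_of_9_extended
-- ===== SOURCE A (Python) =====
-- def decode_free_3_of_9_extended(text):
--     """
--     Decode Free 3 of 9 Extended barcode font to normal ASCII text.
--     Handles /A-Z for control chars, /H for (, /I for ), /D for $, %Q for prefix, etc.
--     """
--     # Replace special sequences
--     decoded = text
--     decoded = decoded.replace("/H", "(").replace("/I", ")").replace("/D", "$")
--     # Replace /A-Z with corresponding ASCII control chars
--     import string
--     for c in string.ascii_uppercase:
--         decoded = decoded.replace(f"/{c}", chr(ord(c) - 64))  # /A -> SOH (chr(1)), /B -> STX (chr(2)), etc.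
--     # Remove %Q prefix if present
--     if decoded.startswith("%Q"):
--         decoded = decoded[2:]
--     return decoded
-- ===== SOURCE B (Python) =====
-- def decode_free_3_of_9_extended(text):
--     """
--     Decode Free 3 of 9 Extended barcode font to normal ASCII text.
--     One left-to-right scan instead of 29 sequential str.replace passes.
--     """
--     out = []
--     i = 0
--     n = len(text)
--     while i < n:
--         ch = text[i]
--         if ch == '/' and i + 1 < n and 'A' <= text[i + 1] <= 'Z':
--             nxt = text[i + 1]
--             if nxt == 'H':
--                 out.append('(')
--             elif nxt == 'I':
--                 out.append(')')
--             elif nxt == 'D':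
--                 out.append('$')
--             else:
--                 out.append(chr(ord(nxt) - 64))
--             i += 2
--         else:
--             out.append(ch)
--             i += 1
--     decoded = ''.join(out)
--     if decoded.startswith('%Q'):
--         decoded = decoded[2:]
--     return decoded
-- ===== Notes on version B (the rewrite author's own statement) =====
-- stated objective: alternative
-- what changed: Replaces A's 29 sequential whole-string str.replace passes with a single left-to-right scan that decodes each two-character slash escape (with the three punctuation overrides) in place.
import Mathlib
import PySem

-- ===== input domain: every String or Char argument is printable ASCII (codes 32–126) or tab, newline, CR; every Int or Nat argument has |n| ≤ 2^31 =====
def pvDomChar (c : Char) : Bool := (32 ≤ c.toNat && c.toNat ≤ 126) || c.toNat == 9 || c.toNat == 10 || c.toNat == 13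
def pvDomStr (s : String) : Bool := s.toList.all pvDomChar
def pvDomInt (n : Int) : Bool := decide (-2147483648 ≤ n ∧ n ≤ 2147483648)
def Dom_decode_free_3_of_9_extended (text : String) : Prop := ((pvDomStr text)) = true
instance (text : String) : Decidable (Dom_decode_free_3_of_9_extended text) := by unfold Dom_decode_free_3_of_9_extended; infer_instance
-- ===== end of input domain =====

-- B decodes the slash escapes in one left-to-right scan instead of A's 29 sequential
-- str.replace passes (alternative decomposition); proved equal on all inputs.

-- ===== PORT A =====
-- string.ascii_uppercase
def pvUppercase : List Char := "ABCDEFGHIJKLMNOPQRSTUVWXYZ".toList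

def decode_free_3_of_9_extended (text : String) : String :=
  let decoded := text
  let decoded := PySem.Str.replace (PySem.Str.replace (PySem.Str.replace decoded "/H" "(") "/I" ")") "/D" "$"
  let decoded := pvUppercase.foldl
      (fun d c => PySem.Str.replace d (String.ofList ['/', c]) (String.ofList [Char.ofNat (c.toNat - 64)]))
      decoded
  if PySem.Str.startswith decoded "%Q" then PySem.Str.slice decoded (some 2) none else decoded

-- ===== PORT B =====
-- value of a '/X' escape (X uppercase): '/H','/I','/D' are punctuation, the rest control chars
def pvEscB (d : Char) : Char :=
  if d = 'H' then '(' else if d = 'I' then ')' else if d = 'D' then '$'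
  else Char.ofNat (d.toNat - 64)

-- the single left-to-right scan of Source B's while loop
def pvScanB : List Char → List Char
  | [] => []
  | [c] => [c]
  | c :: d :: rest =>
    if c = '/' ∧ 'A' ≤ d ∧ d ≤ 'Z' then pvEscB d :: pvScanB rest
    else c :: pvScanB (d :: rest)

def decode_free_3_of_9_extended_alt (text : String) : String :=
  let decoded := String.ofList (pvScanB text.toList)
  if PySem.Str.startswith decoded "%Q" then PySem.Str.slice decoded (some 2) none else decoded

-- ===== PRECONDITION & SPEC =====
def Spec_decode_free_3_of_9_extended (text : String) (out : String) : Prop := out = decode_free_3_of_9_extended_alt text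
instance (text : String) (out : String) : Decidable (Spec_decode_free_3_of_9_extended text out) := by unfold Spec_decode_free_3_of_9_extended; infer_instance

-- ===== CLAIM (what is proved, stated in full; the proofs are below) =====
def Claim_equal_decode_free_3_of_9_extended : Prop := ∀ (text : String), Dom_decode_free_3_of_9_extended text → Spec_decode_free_3_of_9_extended text (decode_free_3_of_9_extended text)

-- ===== LEMMAS AND PROOFS =====

-- proof-side model of one pass of str.replace with pattern ['/', o1] and replacement [r]
def pvRep (o1 r : Char) : List Char → List Char
  | [] => []
  | [x] => [x]
  | x :: y :: t => if x = '/' ∧ y = o1 then r :: pvRep o1 r t else x :: pvRep o1 r (y :: t)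

-- the 29 (pattern, replacement) passes of A, in A's order
def pvOps : List (Char × Char) :=
  ('H', '(') :: ('I', ')') :: ('D', '$') ::
    pvUppercase.map (fun c => (c, Char.ofNat (c.toNat - 64)))

def pvChain (L : List (Char × Char)) (v : List Char) : List Char :=
  L.foldl (fun d p => pvRep p.1 p.2 d) v

-- PySem.Chars.replace with a 2-char pattern and 1-char replacement IS pvRep
theorem pvGo_eq (o1 r : Char) :
    ∀ (fuel : Nat) (s acc : List Char), s.length ≤ fuel →
      PySem.Chars.replace.go ['/', o1] [r] fuel s acc = acc.reverse ++ pvRep o1 r s := by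
  intro fuel
  induction fuel with
  | zero =>
    intro s acc h
    have hs : s = [] := by cases s <;> simp_all
    subst hs
    simp [PySem.Chars.replace.go, pvRep]
  | succ n ih =>
    intro s acc h
    match s with
    | [] => simp [PySem.Chars.replace.go, pvRep]
    | [x] =>
      have hpre : List.isPrefixOf ['/', o1] [x] = false := by
        simp [List.isPrefixOf]
      simp [PySem.Chars.replace.go, hpre, ih [] (x :: acc) (by simp), pvRep]
    | x :: y :: t =>
      by_cases hm : x = '/' ∧ y = o1
      · have hlen : t.length ≤ n := by simp at h; omega
        simp [PySem.Chars.replace.go, List.isPrefixOf, ih t (r :: acc) hlen, pvRep,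
          hm.1, hm.2]
      · have hpre : List.isPrefixOf ['/', o1] (x :: y :: t) = false := by
          by_contra hb
          rw [Bool.not_eq_false] at hb
          obtain ⟨t', ht⟩ := List.isPrefixOf_iff_prefix.mp hb
          simp only [List.cons_append, List.nil_append, List.cons.injEq] at ht
          exact hm ⟨ht.1.symm, ht.2.1.symm⟩
        have hlen : (y :: t).length ≤ n := by simp at h ⊢; omega
        simp [PySem.Chars.replace.go, hpre, ih (y :: t) (x :: acc) hlen, pvRep, hm]

theorem pvReplace_eq (o1 r : Char) (s : List Char) :
    PySem.Chars.replace s ['/', o1] [r] = pvRep o1 r s := by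
  have h := pvGo_eq o1 r s.length s [] le_rfl
  simpa [PySem.Chars.replace] using h

-- basic single-pass facts
theorem pvRep_skip (o1 r x : Char) (s : List Char) (hx : x ≠ '/') :
    pvRep o1 r (x :: s) = x :: pvRep o1 r s := by
  cases s <;> simp [pvRep, hx]

theorem pvRep_match (o1 r : Char) (t : List Char) :
    pvRep o1 r ('/' :: o1 :: t) = r :: pvRep o1 r t := by
  simp [pvRep]

theorem pvRep_slash_skip (o1 r y : Char) (t : List Char) (hy : y ≠ o1) :
    pvRep o1 r ('/' :: y :: t) = '/' :: pvRep o1 r (y :: t) := by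
  simp [pvRep, hy]

-- head of the intermediate string is never an uppercase letter
def pvHeadOK : List Char → Prop
  | [] => True
  | h :: _ => ¬('A' ≤ h ∧ h ≤ 'Z')

theorem pvRep_headOK (o1 r : Char) (hr : ¬('A' ≤ r ∧ r ≤ 'Z')) :
    ∀ (v : List Char), pvHeadOK v → pvHeadOK (pvRep o1 r v) := by
  intro v hv
  match v with
  | [] => simpa [pvRep]
  | [x] => simpa [pvRep] using hv
  | x :: y :: t =>
    by_cases hm : x = '/' ∧ y = o1
    · simpa [pvRep, hm, pvHeadOK] using hr
    · simpa [pvRep, hm, pvHeadOK] using hv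

theorem pvRep_slash (o1 r : Char) (ho1 : 'A' ≤ o1 ∧ o1 ≤ 'Z') (v : List Char)
    (hv : pvHeadOK v) : pvRep o1 r ('/' :: v) = '/' :: pvRep o1 r v := by
  match v with
  | [] => simp [pvRep]
  | y :: t =>
    have hy : y ≠ o1 := by
      intro h; subst h; exact hv ho1
    exact pvRep_slash_skip o1 r y t hy

-- the properties every pass of A's chain has
def pvGood (p : Char × Char) : Prop :=
  ('A' ≤ p.1 ∧ p.1 ≤ 'Z') ∧ p.2 ≠ '/' ∧ ¬('A' ≤ p.2 ∧ p.2 ≤ 'Z')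

theorem pvOps_good : ∀ p ∈ pvOps, pvGood p := by
  simp only [pvGood]
  decide

-- fold lemmas for the whole chain of passes
theorem pvChain_cons (q : Char × Char) (L : List (Char × Char)) (v : List Char) :
    pvChain (q :: L) v = pvChain L (pvRep q.1 q.2 v) := rfl

theorem pvChain_nil (L : List (Char × Char)) : pvChain L [] = [] := by
  induction L with
  | nil => rfl
  | cons q L ih => simpa [pvChain, pvRep] using ih

theorem pvChain_skip (L : List (Char × Char)) (x : Char) (hx : x ≠ '/') :
    ∀ v, pvChain L (x :: v) = x :: pvChain L v := by
  induction L with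
  | nil => intro v; rfl
  | cons q L ih =>
    intro v
    simp only [pvChain, List.foldl_cons] at *
    rw [pvRep_skip q.1 q.2 x v hx, ih]

theorem pvChain_slash (L : List (Char × Char)) (hL : ∀ p ∈ L, pvGood p) :
    ∀ v, pvHeadOK v → pvChain L ('/' :: v) = '/' :: pvChain L v := by
  induction L with
  | nil => intro v _; rfl
  | cons q L ih =>
    intro v hv
    have hq := hL q (by simp)
    simp only [pvChain, List.foldl_cons] at *
    rw [pvRep_slash q.1 q.2 hq.1 v hv,
        ih (fun p hp => hL p (by simp [hp])) _ (pvRep_headOK q.1 q.2 hq.2.2 v hv)]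

theorem pvChain_match (c r : Char) (hc : c ≠ '/') :
    ∀ (L : List (Char × Char)), (∀ p ∈ L, pvGood p) →
      L.find? (fun p => p.1 == c) = some (c, r) →
      ∀ v, pvChain L ('/' :: c :: v) = r :: pvChain L v := by
  intro L
  induction L with
  | nil => intro _ h; simp at h
  | cons q L ih =>
    intro hL hfind v
    by_cases hq : q.1 = c
    · have hqr : q = (c, r) := by
        have : some q = some (c, r) := by
          rw [← hfind, List.find?_cons_of_pos]
          simpa using hq
        simpa using this
      subst hqr
      have hrne : r ≠ '/' := (hL (c, r) (by simp)).2.1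
      rw [pvChain_cons, pvChain_cons, pvRep_match c r v]
      exact pvChain_skip L r hrne _
    · have hfind' : L.find? (fun p => p.1 == c) = some (c, r) := by
        rw [← hfind, List.find?_cons_of_neg]
        simpa using hq
      rw [pvChain_cons, pvChain_cons,
          pvRep_slash_skip q.1 q.2 c v (fun h => hq h.symm),
          pvRep_skip q.1 q.2 c v hc]
      exact ih (fun p hp => hL p (by simp [hp])) hfind' _

-- the first pass of A's chain that matches '/c' produces exactly pvEscB c
theorem pvMem_upper (c : Char) (h1 : 'A' ≤ c) (h2 : c ≤ 'Z') : c ∈ pvUppercase := by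
  have h3 : 65 ≤ c.toNat := by rw [Char.le_def] at h1; exact h1
  have h4 : c.toNat ≤ 90 := by rw [Char.le_def] at h2; exact h2
  interval_cases h : c.toNat <;> (rw [← Char.ofNat_toNat c, h]; decide)

theorem pvFind_self (c : Char) : ∀ (l : List Char), c ∈ l → l.find? (· == c) = some c := by
  intro l
  induction l with
  | nil => simp
  | cons x l ih =>
    intro hm
    by_cases hx : x = c
    · subst hx; rw [List.find?_cons_of_pos (by simp)]
    · rw [List.find?_cons_of_neg (by simpa using hx)]
      exact ih ((List.mem_cons.mp hm).resolve_left (fun h => hx h.symm))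

theorem pvOps_find (c : Char) (hc : 'A' ≤ c ∧ c ≤ 'Z') :
    pvOps.find? (fun p => p.1 == c) = some (c, pvEscB c) := by
  by_cases hH : c = 'H'
  · subst hH; decide
  by_cases hI : c = 'I'
  · subst hI; decide
  by_cases hD : c = 'D'
  · subst hD; decide
  have hmem : c ∈ pvUppercase := pvMem_upper c hc.1 hc.2
  rw [show pvOps = ('H', '(') :: ('I', ')') :: ('D', '$') ::
        pvUppercase.map (fun c => (c, Char.ofNat (c.toNat - 64))) from rfl]
  rw [List.find?_cons_of_neg (by simpa using fun h => hH h.symm),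
      List.find?_cons_of_neg (by simpa using fun h => hI h.symm),
      List.find?_cons_of_neg (by simpa using fun h => hD h.symm),
      List.find?_map]
  rw [show ((fun p : Char × Char => p.1 == c) ∘ fun c => (c, Char.ofNat (c.toNat - 64)))
        = (· == c) from rfl]
  rw [pvFind_self c pvUppercase hmem]
  simp [pvEscB, hH, hI, hD]

-- main lemma: A's 29-pass chain computes B's single scan
theorem pvChain_eq_scan : ∀ s, pvChain pvOps s = pvScanB s := by
  intro s
  induction s using pvScanB.induct with
  | case1 => exact pvChain_nil pvOps
  | case2 c =>
    by_cases hc : c = '/'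
    · subst hc
      rw [show ['/'] = '/' :: ([] : List Char) from by decide,
          pvChain_slash pvOps pvOps_good [] trivial, pvChain_nil]
      rfl
    · rw [pvChain_skip pvOps c hc [], pvChain_nil]
      rfl
  | case3 c d rest h ih =>
    obtain ⟨hc, hd⟩ := h
    subst hc
    have hdne : d ≠ '/' := by
      intro h; rw [h] at hd; exact absurd hd (by decide)
    rw [pvChain_match d (pvEscB d) hdne pvOps pvOps_good (pvOps_find d hd) rest, ih]
    simp only [pvScanB]
    rw [if_pos ⟨trivial, hd⟩]
  | case4 c d rest h ih =>
    by_cases hc : c = '/'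
    · subst hc
      have hd : ¬('A' ≤ d ∧ d ≤ 'Z') := by
        intro hd; exact h ⟨rfl, hd⟩
      rw [pvChain_slash pvOps pvOps_good (d :: rest) hd, ih]
      simp only [pvScanB]
      rw [if_neg (fun hh => h ⟨rfl, hh.2⟩)]
    · rw [pvChain_skip pvOps c hc (d :: rest), ih]
      simp [pvScanB, h]

-- A's decoded string (before the %Q strip), on the character-list level
theorem pvPortA_decoded (text : String) :
    (pvUppercase.foldl
        (fun d c => PySem.Str.replace d (String.ofList ['/', c]) (String.ofList [Char.ofNat (c.toNat - 64)]))
        (PySem.Str.replace (PySem.Str.replace (PySem.Str.replace text "/H" "(") "/I" ")") "/D" "$")).toList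
      = pvChain pvOps text.toList := by
  have step : ∀ (U : List Char) (d : String),
      (U.foldl (fun d c => PySem.Str.replace d (String.ofList ['/', c]) (String.ofList [Char.ofNat (c.toNat - 64)])) d).toList
        = U.foldl (fun l c => pvRep c (Char.ofNat (c.toNat - 64)) l) d.toList := by
    intro U
    induction U with
    | nil => intro d; rfl
    | cons c U ih =>
      intro d
      rw [List.foldl_cons, List.foldl_cons, ih]
      congr 1
      rw [PySem.Str.toList_replace, String.toList_ofList, String.toList_ofList,
          pvReplace_eq]
  have hin : (PySem.Str.replace (PySem.Str.replace (PySem.Str.replace text "/H" "(") "/I" ")") "/D" "$").toList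
      = pvRep 'D' '$' (pvRep 'I' ')' (pvRep 'H' '(' text.toList)) := by
    rw [PySem.Str.toList_replace, PySem.Str.toList_replace, PySem.Str.toList_replace]
    rw [show ("/H" : String).toList = ['/', 'H'] from by decide,
        show ("(" : String).toList = ['('] from by decide,
        show ("/I" : String).toList = ['/', 'I'] from by decide,
        show (")" : String).toList = [')'] from by decide,
        show ("/D" : String).toList = ['/', 'D'] from by decide,
        show ("$" : String).toList = ['$'] from by decide]
    rw [pvReplace_eq, pvReplace_eq, pvReplace_eq]
  rw [step, hin,
      show pvChain pvOps text.toList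
        = pvUppercase.foldl (fun l c => pvRep c (Char.ofNat (c.toNat - 64)) l)
            (pvRep 'D' '$' (pvRep 'I' ')' (pvRep 'H' '(' text.toList))) from by
      rw [pvChain, pvOps, List.foldl_cons, List.foldl_cons, List.foldl_cons,
          List.foldl_map]]

-- ===== VERDICT (by name: the statement is the Claim_ definition above) =====
theorem decode_free_3_of_9_extended_spec : Claim_equal_decode_free_3_of_9_extended := by
  intro text _
  show decode_free_3_of_9_extended text = decode_free_3_of_9_extended_alt text
  have hdec :
      (pvUppercase.foldl
          (fun d c => PySem.Str.replace d (String.ofList ['/', c]) (String.ofList [Char.ofNat (c.toNat - 64)]))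
          (PySem.Str.replace (PySem.Str.replace (PySem.Str.replace text "/H" "(") "/I" ")") "/D" "$"))
        = String.ofList (pvScanB text.toList) := by
    apply String.toList_inj.mp
    rw [pvPortA_decoded, pvChain_eq_scan, String.toList_ofList]
  show (if PySem.Str.startswith
            (pvUppercase.foldl
              (fun d c => PySem.Str.replace d (String.ofList ['/', c]) (String.ofList [Char.ofNat (c.toNat - 64)]))
              (PySem.Str.replace (PySem.Str.replace (PySem.Str.replace text "/H" "(") "/I" ")") "/D" "$")) "%Q"
        then PySem.Str.slice
              (pvUppercase.foldl
                (fun d c => PySem.Str.replace d (String.ofList ['/', c]) (String.ofList [Char.ofNat (c.toNat - 64)]))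
                (PySem.Str.replace (PySem.Str.replace (PySem.Str.replace text "/H" "(") "/I" ")") "/D" "$")) (some 2) none
        else (pvUppercase.foldl
                (fun d c => PySem.Str.replace d (String.ofList ['/', c]) (String.ofList [Char.ofNat (c.toNat - 64)]))
                (PySem.Str.replace (PySem.Str.replace (PySem.Str.replace text "/H" "(") "/I" ")") "/D" "$")))
      = decode_free_3_of_9_extended_alt text
  rw [hdec]
  rfl
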